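-- pv_equiv track=rewrite | github.com/bojan-karlas/string-common-intervals | didier.py | maximal_locations
-- ===== SOURCE A (Python) =====
-- def maximal_locations(string, charset):
--   # Check input parameters.
--   if len(charset) < 1:
--     raise ValueError('The charset argument cannot be empty.')
--
--   locations = []
--   register = {}
--   count = 0
--   start = -1
--
--   # We use a hash table for faster lookup.
--   charsethash = {}
--   for i in range(len(charset)):
--     charsethash[charset[i]] = None
--
--   for i in range(len(string)):
--     c = string[i]
--
--     # Check if we have completed a 'location'
--     if count >= len(charset) and c not in register:
--       locations.append((start, i))
--       register = {}
--       count = 0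
--       start = -1
--
--     # Check if the character is in charset. If not, reset.
--     if c not in charsethash:
--       register = {}
--       count = 0
--       start = -1
--       continue
--     elif start == -1:
--       start = i
--
--     # Check if current char has been encountered in current 'location'.
--     if c not in register:
--       register[c] = None
--       count += 1
--
--   # Check if the current location is tailing the string.
--   if count >= len(charset):
--       locations.append((start, len(string)))
--
--   return locations
-- ===== SOURCE B (Python) =====
-- def maximal_locations(string, charset):
--     # Check input parameters.
--     if len(charset) < 1:
--         raise ValueError('The charset argument cannot be empty.')
--
--     cs = set(charset)
--     need = len(charset)  # threshold uses charset length (with duplicates), as specified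
--     out = []
--     i, n = 0, len(string)
--     while i < n:
--         if string[i] not in cs:
--             i += 1
--             continue
--         # scan one maximal run of charset characters
--         start = i
--         seen = set()
--         while i < n and string[i] in cs:
--             seen.add(string[i])
--             i += 1
--         if len(seen) >= need:
--             out.append((start, i))
--     return out
-- ===== Notes on version B (the rewrite author's own statement) =====
-- stated objective: alternative
-- what changed: Replaces A's single fused scan with register-dict/count/start bookkeeping and mid-scan resets by a two-level run scan: find each maximal run of charset characters, collect its distinct characters in a set, and emit the run's (start,end) iff the distinct count reaches len(charset).
-- outside the precondition, e.g. on maximal_locations('ab', ''): A raises ValueError, B raises ValueError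
import Mathlib
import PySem

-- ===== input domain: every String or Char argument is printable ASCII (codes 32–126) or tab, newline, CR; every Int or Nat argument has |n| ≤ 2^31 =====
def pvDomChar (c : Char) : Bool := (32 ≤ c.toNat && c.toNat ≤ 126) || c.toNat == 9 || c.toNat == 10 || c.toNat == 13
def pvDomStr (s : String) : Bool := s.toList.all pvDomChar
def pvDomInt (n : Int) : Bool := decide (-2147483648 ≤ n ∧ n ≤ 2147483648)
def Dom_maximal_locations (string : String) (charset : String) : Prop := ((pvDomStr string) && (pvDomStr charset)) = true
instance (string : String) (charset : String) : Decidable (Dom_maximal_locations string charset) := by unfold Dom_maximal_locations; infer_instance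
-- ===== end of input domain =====

-- B replaces A's fused scan (register dict / count / start with mid-scan resets) by a two-level
-- run scan: each maximal run of charset characters is scanned once, its distinct characters
-- collected in a set, and (start, end) emitted iff the distinct count reaches len(charset).
-- On an empty charset both Pythons raise ValueError (excluded by Pre_).

-- ===== PORT A =====
-- one iteration of A's main 'for i in range(len(string))' loop; state = (locations, register, count, start)
def mlStep (chash : PySem.Dict Char Unit) (need : Int)
    (st : List (Int × Int) × PySem.Dict Char Unit × Int × Int) (ci : Int × Char) :
    List (Int × Int) × PySem.Dict Char Unit × Int × Int :=
  match st, ci with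
  | (locs, register, count, start), (i, c) =>
    -- Check if we have completed a 'location'
    let s1 :=
      if need ≤ count ∧ register.get? c = none then
        (locs ++ [(start, i)], (PySem.Dict.empty : PySem.Dict Char Unit), (0 : Int), (-1 : Int))
      else (locs, register, count, start)
    match s1 with
    | (locs, register, count, start) =>
      -- Check if the character is in charset. If not, reset ('continue').
      if chash.get? c = none then (locs, PySem.Dict.empty, 0, -1)
      else
        let start := if start = -1 then i else start
        -- Check if current char has been encountered in current 'location'.
        if register.get? c = none then (locs, register.insert c (), count + 1, start)
        else (locs, register, count, start)

def maximal_locations (string : String) (charset : String) : List (Int × Int) :=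
  let s := string.toList
  let cs := charset.toList
  -- charsethash: for i in range(len(charset)): charsethash[charset[i]] = None
  let chash := cs.foldl (fun d c => d.insert c ()) (PySem.Dict.empty : PySem.Dict Char Unit)
  let fin := (PySem.List.enumerate s 0).foldl (mlStep chash (cs.length : Int))
    ([], PySem.Dict.empty, 0, -1)
  -- Check if the current location is tailing the string.
  if (cs.length : Int) ≤ fin.2.2.1 then fin.1 ++ [(fin.2.2.2, (s.length : Int))] else fin.1

-- ===== PORT B =====
-- inner 'while i < n and string[i] in cs' loop: returns (end index, seen, remaining chars)
def mlRun (cset : PySem.Set Char) (l : List Char) (i : Nat) (seen : PySem.Set Char) :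
    Nat × PySem.Set Char × List Char :=
  match l with
  | [] => (i, seen, [])
  | c :: rest =>
    if PySem.Set.contains cset c then mlRun cset rest (i + 1) (PySem.Set.add seen c)
    else (i, seen, c :: rest)

-- needed for mlGo's termination
theorem mlRun_rem_le (cset : PySem.Set Char) (l : List Char) :
    ∀ (i : Nat) (seen : PySem.Set Char), (mlRun cset l i seen).2.2.length ≤ l.length := by
  induction l with
  | nil => intro i seen; simp [mlRun]
  | cons c rest ih =>
    intro i seen
    simp only [mlRun]
    split
    · exact Nat.le_succ_of_le (ih _ _)
    · simp

-- outer 'while i < n' loop of Source B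
def mlGo (cset : PySem.Set Char) (need : Nat) (l : List Char) (i : Nat) : List (Int × Int) :=
  match l with
  | [] => []
  | c :: rest =>
    if PySem.Set.contains cset c then
      let r := mlRun cset rest (i + 1) (PySem.Set.add PySem.Set.empty c)
      (if need ≤ r.2.1.length then [((i : Int), (r.1 : Int))] else []) ++ mlGo cset need r.2.2 r.1
    else mlGo cset need rest (i + 1)
termination_by l.length
decreasing_by
  · exact Nat.lt_succ_of_le (mlRun_rem_le cset rest (i + 1) (PySem.Set.add PySem.Set.empty c))
  · simp

def maximal_locations_alt (string : String) (charset : String) : List (Int × Int) :=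
  let cs := charset.toList
  mlGo (PySem.Set.ofList cs) cs.length string.toList 0

-- ===== PRECONDITION & SPEC =====
-- Pre_ excludes only the empty charset, on which Python A raises ValueError (and B raises too).
def Pre_maximal_locations (string : String) (charset : String) : Prop := charset.toList ≠ []
instance (string : String) (charset : String) : Decidable (Pre_maximal_locations string charset) := by
  unfold Pre_maximal_locations; infer_instance

def pvWitness_maximal_locations : String × String := ("xabba yab", "ab")

def Spec_maximal_locations (string : String) (charset : String) (out : List (Int × Int)) : Prop := out = maximal_locations_alt string charset
instance (string : String) (charset : String) (out : List (Int × Int)) : Decidable (Spec_maximal_locations string charset out) := by unfold Spec_maximal_locations; infer_instance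

-- ===== CLAIM (what is proved, stated in full; the proofs are below) =====
def Claim_equal_maximal_locations : Prop := ∀ (string : String) (charset : String), Dom_maximal_locations string charset → Pre_maximal_locations string charset → Spec_maximal_locations string charset (maximal_locations string charset)

-- ===== LEMMAS AND PROOFS =====

-- A's charsethash, named for the proofs (definitionally the fold inside the port)
def mlHash (cs : List Char) : PySem.Dict Char Unit :=
  cs.foldl (fun d c => d.insert c ()) PySem.Dict.empty

-- A's tail-of-string finalisation, named for the proofs
def mlFin (cs : List Char) (st : List (Int × Int) × PySem.Dict Char Unit × Int × Int)
    (n : Nat) : List (Int × Int) :=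
  if (cs.length : Int) ≤ st.2.2.1 then st.1 ++ [(st.2.2.2, (n : Int))] else st.1

theorem foldl_insert_get_none (l : List Char) :
    ∀ (d : PySem.Dict Char Unit) (c : Char),
      ((l.foldl (fun d c => d.insert c ()) d).get? c = none) ↔ (c ∉ l ∧ d.get? c = none) := by
  induction l with
  | nil => intro d c; simp
  | cons a rest ih =>
    intro d c
    simp only [List.foldl_cons, ih, List.mem_cons, PySem.Dict.get?_insert]
    by_cases h : c = a <;> simp [h]

theorem mlHash_get_none (cs : List Char) (c : Char) :
    ((mlHash cs).get? c = none) ↔ c ∉ cs := by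
  simp [mlHash, foldl_insert_get_none]

-- cardinality: a duplicate-free sublist of cs at least as long as cs contains every element of cs
theorem seen_full (cs seen : List Char) (hnd : seen.Nodup) (hsub : ∀ x ∈ seen, x ∈ cs)
    (hlen : cs.length ≤ seen.length) {c : Char} (hc : c ∈ cs) : c ∈ seen := by
  by_contra h
  have hnd2 : (seen ++ [c]).Nodup := by
    simp [List.nodup_append, hnd]
    intro a ha hac
    exact h (hac ▸ ha)
  have hsub2 : (seen ++ [c]) ⊆ cs := by
    intro x hx
    rcases List.mem_append.1 hx with hx | hx
    · exact hsub x hx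
    · simp at hx; exact hx ▸ hc
  have := (List.Nodup.subperm hnd2 hsub2).length_le
  simp at this
  omega

-- how one A-step evaluates while the scanned character is in the charset
theorem mlStep_in (chash : PySem.Dict Char Unit) (need : Int) (locs : List (Int × Int))
    (register : PySem.Dict Char Unit) (count start : Int) (i : Int) (c : Char)
    (h1 : ¬(need ≤ count ∧ register.get? c = none)) (h2 : ¬ chash.get? c = none) :
    mlStep chash need (locs, register, count, start) (i, c) =
      if register.get? c = none
      then (locs, register.insert c (), count + 1, if start = -1 then i else start)
      else (locs, register, count, if start = -1 then i else start) := by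
  simp only [mlStep, if_neg h1, if_neg h2]

-- how one A-step evaluates on a character outside the charset
theorem mlStep_out (chash : PySem.Dict Char Unit) (need : Int) (locs : List (Int × Int))
    (register : PySem.Dict Char Unit) (count start : Int) (i : Int) (c : Char)
    (h2 : chash.get? c = none) :
    mlStep chash need (locs, register, count, start) (i, c) =
      ((if need ≤ count ∧ register.get? c = none then locs ++ [(start, i)] else locs),
        PySem.Dict.empty, 0, -1) := by
  simp only [mlStep]
  split_ifs with h1 <;> rfl

-- the main loop correspondence: A's fold from the idle state (resp. from an in-run state
-- described by 'seen') equals B's mlGo (resp. the current mlRun followed by mlGo)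
theorem ml_main (cs : List Char) (hcs : cs ≠ []) (l : List Char) :
    (∀ (i : Nat) (locs : List (Int × Int)),
      mlFin cs ((PySem.List.enumerate l (i : Int)).foldl (mlStep (mlHash cs) (cs.length : Int))
          (locs, PySem.Dict.empty, 0, -1)) (i + l.length)
        = locs ++ mlGo (PySem.Set.ofList cs) cs.length l i)
    ∧ (∀ (i : Nat) (locs : List (Int × Int)) (seen : PySem.Set Char)
        (register : PySem.Dict Char Unit) (start0 : Nat),
        seen.Nodup → (∀ x ∈ seen, x ∈ cs) →
        (∀ x, register.get? x = none ↔ x ∉ seen) →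
        mlFin cs ((PySem.List.enumerate l (i : Int)).foldl (mlStep (mlHash cs) (cs.length : Int))
            (locs, register, (seen.length : Int), (start0 : Int))) (i + l.length)
          = (if cs.length ≤ (mlRun (PySem.Set.ofList cs) l i seen).2.1.length
             then locs ++ [((start0 : Int), ((mlRun (PySem.Set.ofList cs) l i seen).1 : Int))]
             else locs)
            ++ mlGo (PySem.Set.ofList cs) cs.length (mlRun (PySem.Set.ofList cs) l i seen).2.2
                (mlRun (PySem.Set.ofList cs) l i seen).1) := by
  have hneed : 0 < cs.length := List.length_pos_of_ne_nil hcs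
  induction l with
  | nil =>
    constructor
    · intro i locs
      simp only [PySem.List.enumerate, List.foldl_nil, List.length_nil, Nat.add_zero, mlFin, mlGo]
      rw [if_neg (by simp; omega)]
      simp
    · intro i locs seen register start0 _ _ _
      simp only [PySem.List.enumerate, List.foldl_nil, List.length_nil, Nat.add_zero, mlFin,
        mlRun, mlGo]
      by_cases h : cs.length ≤ seen.length
      · rw [if_pos (by exact_mod_cast h), if_pos h]; simp
      · rw [if_neg (by exact_mod_cast h), if_neg h]; simp
  | cons c rest ih =>
    obtain ⟨ihI, ihR⟩ := ih
    constructor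
    · intro i locs
      rw [PySem.List.enumerate_cons, List.foldl_cons]
      have hlen : (i + 1) + rest.length = i + (c :: rest).length := by simp; omega
      by_cases hc : c ∈ cs
      · have hb1 : ¬((cs.length : Int) ≤ (0 : Int) ∧
            (PySem.Dict.empty : PySem.Dict Char Unit).get? c = none) := by
          rintro ⟨h1, _⟩; omega
        have h2 : ¬ (mlHash cs).get? c = none := by rw [mlHash_get_none]; simpa using hc
        rw [mlStep_in (mlHash cs) (cs.length : Int) locs PySem.Dict.empty 0 (-1) (i : Int) c hb1 h2,
          if_pos (by simp), if_pos rfl]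
        have hseen1 : PySem.Set.add PySem.Set.empty c = [c] := by
          simp [PySem.Set.add_of_not_mem, PySem.Set.empty]
        have h := ihR (i + 1) locs (PySem.Set.add PySem.Set.empty c)
          (PySem.Dict.empty.insert c ()) i
          (by rw [hseen1]; simp)
          (by rw [hseen1]; simpa using hc)
          (by intro x; rw [hseen1]; by_cases hxc : x = c <;> simp [PySem.Dict.get?_insert, hxc])
        rw [hseen1] at h
        simp only [Nat.cast_add, Nat.cast_one, List.length_singleton] at h
        rw [hlen] at h
        have hcont : PySem.Set.contains (PySem.Set.ofList cs) c = true := by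
          rw [PySem.Set.contains_iff]; simp [PySem.Set.mem_ofList, hc]
        rw [zero_add, h, mlGo, if_pos hcont]
        rw [hseen1]
        split_ifs with hP <;> simp [hP]
      · have h2 : (mlHash cs).get? c = none := (mlHash_get_none cs c).2 hc
        rw [mlStep_out (mlHash cs) (cs.length : Int) locs PySem.Dict.empty 0 (-1) (i : Int) c h2,
          if_neg (by rintro ⟨h1, _⟩; omega)]
        have h := ihI (i + 1) locs
        simp only [Nat.cast_add, Nat.cast_one] at h
        rw [hlen] at h
        have hcont : ¬ PySem.Set.contains (PySem.Set.ofList cs) c = true := by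
          simp [PySem.Set.mem_ofList, hc]
        rw [h, mlGo, if_neg hcont]
    · intro i locs seen register start0 hnd hsub hreg
      rw [PySem.List.enumerate_cons, List.foldl_cons]
      have hlen : (i + 1) + rest.length = i + (c :: rest).length := by simp; omega
      by_cases hc : c ∈ cs
      · have hcont : PySem.Set.contains (PySem.Set.ofList cs) c = true := by
          simp [PySem.Set.mem_ofList, hc]
        have hb1 : ¬((cs.length : Int) ≤ ((seen.length : Nat) : Int) ∧
            register.get? c = none) := by
          rintro ⟨h1, h2⟩
          exact ((hreg c).1 h2) (seen_full cs seen hnd hsub (by exact_mod_cast h1) hc)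
        have h2 : ¬ (mlHash cs).get? c = none := by rw [mlHash_get_none]; simpa using hc
        rw [mlStep_in (mlHash cs) (cs.length : Int) locs register (seen.length : Int)
          (start0 : Int) (i : Int) c hb1 h2,
          if_neg (show ¬((start0 : Nat) : Int) = -1 by omega)]
        have hrun : mlRun (PySem.Set.ofList cs) (c :: rest) i seen
            = mlRun (PySem.Set.ofList cs) rest (i + 1) (PySem.Set.add seen c) := by
          rw [mlRun, if_pos hcont]
        by_cases hcs2 : c ∈ seen
        · have hro : ¬ register.get? c = none := fun h => ((hreg c).1 h) hcs2
          rw [if_neg hro]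
          have hadd : PySem.Set.add seen c = seen := PySem.Set.add_of_mem hcs2
          have h := ihR (i + 1) locs seen register start0 hnd hsub hreg
          simp only [Nat.cast_add, Nat.cast_one] at h
          rw [hlen] at h
          rw [h, hrun, hadd]
        · have hro : register.get? c = none := (hreg c).2 hcs2
          rw [if_pos hro]
          have hadd : PySem.Set.add seen c = seen ++ [c] := PySem.Set.add_of_not_mem hcs2
          have h := ihR (i + 1) locs (PySem.Set.add seen c) (register.insert c ()) start0
            (by rw [hadd]; simp [List.nodup_append, hnd]; intro a ha hac; exact hcs2 (hac ▸ ha))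
            (by intro x hx; rw [hadd] at hx; rcases List.mem_append.1 hx with hx | hx
                · exact hsub x hx
                · simp at hx; exact hx ▸ hc)
            (by intro x
                rw [hadd]
                simp only [PySem.Dict.get?_insert, List.mem_append, List.mem_singleton]
                by_cases hxc : x = c <;> simp [hxc, hreg x])
          simp only [Nat.cast_add, Nat.cast_one] at h
          rw [hlen] at h
          rw [show ((PySem.Set.add seen c).length : Int) = ((seen.length : Nat) : Int) + 1 by
            rw [hadd]; simp] at h
          rw [h, hrun]
      · have hcont : ¬ PySem.Set.contains (PySem.Set.ofList cs) c = true := by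
          simp [PySem.Set.mem_ofList, hc]
        have hcnone : register.get? c = none := (hreg c).2 (fun h => hc (hsub c h))
        have h2 : (mlHash cs).get? c = none := (mlHash_get_none cs c).2 hc
        have hrun : mlRun (PySem.Set.ofList cs) (c :: rest) i seen = (i, seen, c :: rest) := by
          rw [mlRun, if_neg hcont]
        have hgo : mlGo (PySem.Set.ofList cs) cs.length (c :: rest) i
            = mlGo (PySem.Set.ofList cs) cs.length rest (i + 1) := by
          rw [mlGo, if_neg hcont]
        rw [mlStep_out (mlHash cs) (cs.length : Int) locs register (seen.length : Int)
          (start0 : Int) (i : Int) c h2]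
        by_cases hl : cs.length ≤ seen.length
        · rw [if_pos ⟨by exact_mod_cast hl, hcnone⟩]
          have h := ihI (i + 1) (locs ++ [((start0 : Int), (i : Int))])
          simp only [Nat.cast_add, Nat.cast_one] at h
          rw [hlen] at h
          rw [h, hrun, hgo]
          simp only []
          rw [if_pos hl, List.append_assoc]
        · rw [if_neg (by rintro ⟨h1, _⟩; exact hl (by exact_mod_cast h1))]
          have h := ihI (i + 1) locs
          simp only [Nat.cast_add, Nat.cast_one] at h
          rw [hlen] at h
          rw [h, hrun, hgo]
          simp only []
          rw [if_neg hl]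

theorem maximal_locations_spec : Claim_equal_maximal_locations := by
  intro string charset _ hpre
  unfold Spec_maximal_locations
  have h := (ml_main charset.toList hpre string.toList).1 0 []
  simpa [maximal_locations, maximal_locations_alt, mlFin, mlHash] using h
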